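-- pv_equiv track=rewrite | github.com/pypi-data/pypi-mirror-357 | packages/genagent/genagent-0.2.6-py3-none-any.whl/genagent/llm_utils.py | modular_instructions
-- ===== SOURCE A (Python) =====
-- from typing import Any, Dict, List
--
-- def make_output_format(modules: List[Dict]) -> str:
--     """Generate JSON output format string from modules.
--
--     Args:
--         modules: List of module dicts with optional 'name' field
--
--     Returns:
--         JSON format string for response
--     """
--     output_format = "Response format:\n{\n"
--     for module in modules:
--         if 'name' in module and module['name']:
--             output_format += f'    "{module["name"].lower()}": "...",\n'
--     output_format = output_format.rstrip(',\n') + "\n}"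
--     return output_format
--
-- def modular_instructions(modules: List[Dict]) -> tuple[str, List[str]]:
--     """Generate a prompt from instruction modules.
--
--     Args:
--         modules: List of dicts with:
--             - 'instruction': The text instruction (required)
--             - 'name': Output key name (optional)
--             - 'image': URL of an image to include (optional)
--
--     Returns:
--         Tuple of (prompt, image_urls)
--     """
--     prompt = ""
--     step_count = 0
--     image_urls = []
--
--     for module in modules:
--         # Collect image URLs if present
--         if 'image' in module:
--             image_urls.append(module['image'])
--
--         if 'name' in module:
--             step_count += 1
--             prompt += f"Step {step_count} ({module['name']}): {module['instruction']}\n"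
--         else:
--             prompt += f"{module['instruction']}\n"
--
--     prompt += "\n"
--     prompt += make_output_format(modules)
--     return prompt, image_urls
-- ===== SOURCE B (Python) =====
-- def modular_instructions(modules):
--     """Single fused pass: collects prompt parts, image urls and output-format
--     entries together, then assembles the blocks with str.join (no rstrip)."""
--     parts = []
--     image_urls = []
--     entries = []
--     step = 0
--     for m in modules:
--         if 'image' in m:
--             image_urls.append(m['image'])
--         if 'name' in m:
--             step += 1
--             parts.append(f"Step {step} ({m['name']}): {m['instruction']}\n")
--             if m['name']:
--                 entries.append(f'    "{m["name"].lower()}": "..."')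
--         else:
--             parts.append(f"{m['instruction']}\n")
--     if entries:
--         block = "Response format:\n{\n" + ",\n".join(entries) + "\n}"
--     else:
--         block = "Response format:\n{\n}"
--     return "".join(parts) + "\n" + block, image_urls
-- ===== Notes on version B (the rewrite author's own statement) =====
-- stated objective: alternative
-- what changed: One fused loop collects prompt parts, image urls and output-format entries together; the output block is assembled with ',\n'.join plus an explicit empty-entries case instead of a second scan over modules followed by rstrip(',\n').
import Mathlib
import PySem

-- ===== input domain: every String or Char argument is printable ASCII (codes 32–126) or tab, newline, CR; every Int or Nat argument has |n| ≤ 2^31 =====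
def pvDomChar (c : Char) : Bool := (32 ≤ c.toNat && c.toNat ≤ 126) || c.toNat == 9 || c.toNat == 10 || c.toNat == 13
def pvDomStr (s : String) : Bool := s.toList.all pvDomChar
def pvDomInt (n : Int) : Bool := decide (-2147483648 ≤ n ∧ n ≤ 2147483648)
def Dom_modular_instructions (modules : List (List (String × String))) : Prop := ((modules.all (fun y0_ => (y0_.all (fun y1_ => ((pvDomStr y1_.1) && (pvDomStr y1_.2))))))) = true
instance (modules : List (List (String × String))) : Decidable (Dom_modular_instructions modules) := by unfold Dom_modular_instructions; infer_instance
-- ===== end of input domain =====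

-- B fuses A's two passes (main loop + make_output_format scan) into one loop and
-- builds the output block with join instead of string growth + rstrip; same values.

-- shared dict-access helper: module[k] / 'k' in module on the dict the assoc list denotes
def pvGet? (m : List (String × String)) (k : String) : Option String :=
  (PySem.Dict.ofList m).get? k

-- Python's s.rstrip(chars), exact: drop trailing chars that occur in `chars`
def pvRstrip (s : List Char) (chars : List Char) : List Char :=
  (s.reverse.dropWhile (fun c => chars.contains c)).reverse

-- ===== PORT A =====
-- make_output_format; module['instruction'] etc. use getD "" — Pre_ excludes the
-- KeyError case (missing 'instruction'), and 'name'/'image' are only read when present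
def pvOutFmtStep (acc : List Char) (m : List (String × String)) : List Char :=
  match pvGet? m "name" with
  | some n => if n.toList ≠ [] then
      acc ++ "    \"".toList ++ PySem.Chars.lower n.toList ++ "\": \"...\",\n".toList
    else acc
  | none => acc

def pvMakeOutputFormat (modules : List (List (String × String))) : List Char :=
  pvRstrip (modules.foldl pvOutFmtStep "Response format:\n{\n".toList) [',', '\n'] ++ "\n}".toList

def pvAStep (st : List Char × Int × List String) (m : List (String × String)) :
    List Char × Int × List String :=
  let prompt := st.1
  let step := st.2.1
  let urls := st.2.2
  let urls := match pvGet? m "image" with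
    | some u => urls ++ [u]
    | none => urls
  let instr := (pvGet? m "instruction").getD ""
  match pvGet? m "name" with
  | some n =>
      (prompt ++ "Step ".toList ++ PySem.Int.toChars (step + 1) ++ " (".toList
         ++ n.toList ++ "): ".toList ++ instr.toList ++ ['\n'], step + 1, urls)
  | none => (prompt ++ instr.toList ++ ['\n'], step, urls)

def modular_instructions (modules : List (List (String × String))) : String × List String :=
  let st := modules.foldl pvAStep ([], 0, [])
  (String.mk (st.1 ++ ['\n'] ++ pvMakeOutputFormat modules), st.2.2)

-- ===== PORT B =====
def pvBStep (st : List (List Char) × Int × List String × List (List Char))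
    (m : List (String × String)) :
    List (List Char) × Int × List String × List (List Char) :=
  let parts := st.1
  let step := st.2.1
  let urls := st.2.2.1
  let entries := st.2.2.2
  let urls := match pvGet? m "image" with
    | some u => urls ++ [u]
    | none => urls
  let instr := (pvGet? m "instruction").getD ""
  match pvGet? m "name" with
  | some n =>
      (parts ++ ["Step ".toList ++ PySem.Int.toChars (step + 1) ++ " (".toList
          ++ n.toList ++ "): ".toList ++ instr.toList ++ ['\n']],
       step + 1, urls,
       if n.toList ≠ [] then
         entries ++ ["    \"".toList ++ PySem.Chars.lower n.toList ++ "\": \"...\"".toList]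
       else entries)
  | none => (parts ++ [instr.toList ++ ['\n']], step, urls, entries)

def modular_instructions_alt (modules : List (List (String × String))) : String × List String :=
  let st := modules.foldl pvBStep ([], 0, [], [])
  let block :=
    if st.2.2.2 ≠ [] then
      "Response format:\n{\n".toList ++ PySem.Chars.join ",\n".toList st.2.2.2 ++ "\n}".toList
    else "Response format:\n{\n}".toList
  (String.mk (PySem.Chars.join [] st.1 ++ ['\n'] ++ block), st.2.2.1)

-- ===== PRECONDITION & SPEC =====
-- Pre_ excludes exactly the inputs where the Python A raises KeyError:
-- some module has no 'instruction' key (B raises there too).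
def Pre_modular_instructions (modules : List (List (String × String))) : Prop :=
  (modules.all (fun m => (pvGet? m "instruction").isSome)) = true
instance (modules : List (List (String × String))) : Decidable (Pre_modular_instructions modules) := by unfold Pre_modular_instructions; infer_instance

def pvWitness_modular_instructions : (List (List (String × String))) :=
  [[("instruction", "do the thing"), ("name", "Plan")], [("instruction", "then this"), ("image", "http://x/y.png")]]

def Spec_modular_instructions (modules : List (List (String × String))) (out : String × List String) : Prop := out = modular_instructions_alt modules
instance (modules : List (List (String × String))) (out : String × List String) : Decidable (Spec_modular_instructions modules out) := by unfold Spec_modular_instructions; infer_instance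

-- ===== CLAIM (what is proved, stated in full; the proofs are below) =====
def Claim_equal_modular_instructions : Prop := ∀ (modules : List (List (String × String))), Dom_modular_instructions modules → Pre_modular_instructions modules → Spec_modular_instructions modules (modular_instructions modules)

-- ===== LEMMAS AND PROOFS =====

lemma pvJoin_nil_flatten (ps : List (List Char)) : PySem.Chars.join [] ps = ps.flatten := by
  induction ps with
  | nil => simp [PySem.Chars.join_nil]
  | cons p rest ih =>
    cases rest with
    | nil => simp [PySem.Chars.join_singleton]
    | cons q r => rw [PySem.Chars.join_cons_cons]; simp_all

-- the output-format entry a module with name n contributes (without the trailing ",\n")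
def pvEntry (n : String) : List Char :=
  "    \"".toList ++ PySem.Chars.lower n.toList ++ "\": \"...\"".toList

def pvEntriesOf (modules : List (List (String × String))) : List (List Char) :=
  modules.filterMap (fun m =>
    match pvGet? m "name" with
    | some n => if n.toList ≠ [] then some (pvEntry n) else none
    | none => none)

lemma pvEntry_getLast (n : String) : (pvEntry n).getLast? = some '"' := by
  have h : pvEntry n = ("    \"".toList ++ PySem.Chars.lower n.toList
      ++ ['\"', ':', ' ', '\"', '.', '.', '.']) ++ ['\"'] := by simp [pvEntry]
  rw [h, List.getLast?_concat]

lemma pvOutFmt_fold (modules : List (List (String × String))) : ∀ acc : List Char,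
    modules.foldl pvOutFmtStep acc = acc ++ (pvEntriesOf modules).flatMap (· ++ [',', '\n']) := by
  induction modules with
  | nil => intro acc; simp [pvEntriesOf]
  | cons m ms ih =>
    intro acc
    simp only [List.foldl_cons, pvEntriesOf, List.filterMap_cons]
    cases h : pvGet? m "name" with
    | none => simpa [pvOutFmtStep, h, pvEntriesOf] using ih _
    | some n =>
      by_cases hn : n.toList = []
      · simpa [pvOutFmtStep, h, hn, pvEntriesOf] using ih _
      · simp only [pvOutFmtStep, h, hn, if_pos, ne_eq, not_false_eq_true]
        rw [ih]
        simp [pvEntriesOf, pvEntry]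

lemma pvRstrip_append (X : List Char) (c : Char) (h : X.getLast? = some c)
    (hc : ([',', '\n'] : List Char).contains c = false) :
    pvRstrip (X ++ [',', '\n']) [',', '\n'] = X := by
  have hrev : X.reverse.head? = some c := by
    rw [List.head?_reverse]; exact h
  obtain ⟨t, ht⟩ : ∃ t, X.reverse = c :: t := by
    cases hXr : X.reverse with
    | nil => simp [hXr] at hrev
    | cons a t => rw [hXr] at hrev; simp at hrev; exact ⟨t, by rw [hrev]⟩
  have hc1 : c ≠ ',' ∧ c ≠ '\n' := by simpa using hc
  unfold pvRstrip
  rw [List.reverse_append, ht]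
  have h1 : List.dropWhile (fun c => ([',', '\n'] : List Char).contains c)
      (([',', '\n'] : List Char).reverse ++ c :: t) = c :: t := by
    simp [hc1.1, hc1.2]
  rw [h1, ← ht, List.reverse_reverse]

-- folding rstrip through the flattened entries: yields the ",\n"-join
lemma pvRstrip_flat (es : List (List Char)) (hes : es ≠ [])
    (hend : ∀ e ∈ es, e.getLast? = some '"') : ∀ acc : List Char,
    pvRstrip (acc ++ es.flatMap (· ++ [',', '\n'])) [',', '\n']
      = acc ++ PySem.Chars.join [',', '\n'] es := by
  induction es with
  | nil => exact absurd rfl hes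
  | cons e es ih =>
    intro acc
    cases es with
    | nil =>
      have he := hend e (by simp)
      have : acc ++ [e].flatMap (· ++ [',', '\n']) = (acc ++ e) ++ [',', '\n'] := by simp
      rw [this, pvRstrip_append (acc ++ e) '"' (by rw [List.getLast?_append]; simp [he]) (by decide)]
      rw [PySem.Chars.join_singleton]
    | cons e2 es2 =>
      have h1 : (e :: e2 :: es2).flatMap (· ++ [',', '\n'])
          = (e ++ [',', '\n']) ++ (e2 :: es2).flatMap (· ++ [',', '\n']) := by simp
      rw [h1, ← List.append_assoc]
      rw [ih (by simp) (fun x hx => hend x (by simp [hx]))]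
      rw [PySem.Chars.join_cons_cons]
      simp

-- the fused loop of B tracks A's loop plus the entries of the second scan
lemma pvEntriesOf_cons (m : List (String × String)) (ms : List (List (String × String))) :
    pvEntriesOf (m :: ms)
      = (match pvGet? m "name" with
         | some n => if n.toList ≠ [] then [pvEntry n] else []
         | none => []) ++ pvEntriesOf ms := by
  unfold pvEntriesOf
  rw [List.filterMap_cons]
  cases pvGet? m "name" with
  | none => simp
  | some n =>
    by_cases h : n.toList = [] <;> simp [h]

lemma pvLoop_rel (modules : List (List (String × String))) :
    ∀ (parts : List (List Char)) (step : Int) (urls : List String) (entries : List (List Char)),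
    (modules.foldl pvAStep (PySem.Chars.join [] parts, step, urls)).1
        = PySem.Chars.join [] (modules.foldl pvBStep (parts, step, urls, entries)).1
    ∧ (modules.foldl pvAStep (PySem.Chars.join [] parts, step, urls)).2.1
        = (modules.foldl pvBStep (parts, step, urls, entries)).2.1
    ∧ (modules.foldl pvAStep (PySem.Chars.join [] parts, step, urls)).2.2
        = (modules.foldl pvBStep (parts, step, urls, entries)).2.2.1
    ∧ (modules.foldl pvBStep (parts, step, urls, entries)).2.2.2
        = entries ++ pvEntriesOf modules := by
  induction modules with
  | nil => intro parts step urls entries; simp [pvEntriesOf]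
  | cons m ms ih =>
    intro parts step urls entries
    simp only [List.foldl_cons]
    have hjoin : ∀ (ps : List (List Char)) (x : List Char),
        PySem.Chars.join [] (ps ++ [x]) = PySem.Chars.join [] ps ++ x := by
      intro ps x
      rw [pvJoin_nil_flatten, pvJoin_nil_flatten]
      simp
    cases hn : pvGet? m "name" with
    | some n =>
      have hA : ms.foldl pvAStep (pvAStep (PySem.Chars.join [] parts, step, urls) m)
          = ms.foldl pvAStep (PySem.Chars.join [] (parts ++
              ["Step ".toList ++ PySem.Int.toChars (step + 1) ++ " (".toList
                ++ n.toList ++ "): ".toList ++ ((pvGet? m "instruction").getD "").toList ++ ['\n']]),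
              step + 1,
              (match pvGet? m "image" with | some u => urls ++ [u] | none => urls)) := by
        rw [hjoin]
        simp [pvAStep, hn]
      rw [hA]
      have hB : pvBStep (parts, step, urls, entries) m
          = (parts ++
              ["Step ".toList ++ PySem.Int.toChars (step + 1) ++ " (".toList
                ++ n.toList ++ "): ".toList ++ ((pvGet? m "instruction").getD "").toList ++ ['\n']],
             step + 1,
             (match pvGet? m "image" with | some u => urls ++ [u] | none => urls),
             (if n.toList ≠ [] then entries ++ [pvEntry n] else entries)) := by
        simp [pvBStep, hn, pvEntry]
      rw [hB]
      refine ⟨(ih _ _ _ _).1, (ih _ _ _ _).2.1, (ih _ _ _ _).2.2.1, ?_⟩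
      rw [(ih _ _ _ _).2.2.2, pvEntriesOf_cons, hn]
      by_cases hne : n.toList = []
      · simp [hne]
      · simp [hne]
    | none =>
      have hA : ms.foldl pvAStep (pvAStep (PySem.Chars.join [] parts, step, urls) m)
          = ms.foldl pvAStep (PySem.Chars.join [] (parts ++
              [((pvGet? m "instruction").getD "").toList ++ ['\n']]), step,
              (match pvGet? m "image" with | some u => urls ++ [u] | none => urls)) := by
        rw [hjoin]
        simp [pvAStep, hn]
      rw [hA]
      have hB : pvBStep (parts, step, urls, entries) m
          = (parts ++ [((pvGet? m "instruction").getD "").toList ++ ['\n']], step,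
             (match pvGet? m "image" with | some u => urls ++ [u] | none => urls), entries) := by
        simp [pvBStep, hn]
      rw [hB]
      refine ⟨(ih _ _ _ _).1, (ih _ _ _ _).2.1, (ih _ _ _ _).2.2.1, ?_⟩
      rw [(ih _ _ _ _).2.2.2, pvEntriesOf_cons, hn]
      simp

lemma pvEntriesOf_getLast (modules : List (List (String × String))) :
    ∀ e ∈ pvEntriesOf modules, e.getLast? = some '"' := by
  intro e he
  simp only [pvEntriesOf, List.mem_filterMap] at he
  obtain ⟨m, _, hm⟩ := he
  cases hn : pvGet? m "name" with
  | none => simp [hn] at hm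
  | some n =>
    rw [hn] at hm
    rw [show (match some n with
        | some n => if n.toList ≠ [] then some (pvEntry n) else none
        | none => (none : Option (List Char)))
        = if n.toList ≠ [] then some (pvEntry n) else none from rfl] at hm
    by_cases hne : n.toList = []
    · rw [if_neg (by simp [hne])] at hm
      exact absurd hm (by simp)
    · rw [if_pos hne] at hm
      rw [← Option.some_inj.mp hm]
      exact pvEntry_getLast n

lemma pvOutputFormat_eq (modules : List (List (String × String))) :
    pvMakeOutputFormat modules
      = if pvEntriesOf modules ≠ [] then
          "Response format:\n{\n".toList
            ++ PySem.Chars.join ",\n".toList (pvEntriesOf modules) ++ "\n}".toList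
        else "Response format:\n{\n}".toList := by
  unfold pvMakeOutputFormat
  rw [pvOutFmt_fold]
  by_cases h : pvEntriesOf modules = []
  · rw [h]; decide
  · rw [if_pos h]
    have hcomma : (",\n".toList : List Char) = [',', '\n'] := by decide
    rw [hcomma, pvRstrip_flat (pvEntriesOf modules) h (pvEntriesOf_getLast modules)]

-- ===== VERDICT (by name: the statement is the Claim_ definition above) =====
theorem modular_instructions_spec : Claim_equal_modular_instructions := by
  intro modules _ _
  unfold Spec_modular_instructions modular_instructions modular_instructions_alt
  have h := pvLoop_rel modules [] 0 [] []
  rw [show PySem.Chars.join ([] : List Char) ([] : List (List Char)) = [] from rfl] at h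
  obtain ⟨h1, _, h3, h4⟩ := h
  rw [pvOutputFormat_eq]
  simp only [h1, h3, h4, List.nil_append]
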